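-- pv_equiv track=rewrite | github.com/ORNL/faro | src/faro/pyvision/beta/vtm.py | groupOffsets
-- ===== SOURCE A (Python) =====
-- def groupOffsets(offsets):
--     offsets.sort()
--     group = []
--     groups = [group]
--     for each in offsets:
--         if len(group) == 0 or each == group[-1]+1:
--             group.append(each)
--         else:
--             group = [each]
--             groups.append(group)
--
--
--     return groups
-- ===== SOURCE B (Python) =====
-- import itertools
--
-- def groupOffsets(offsets):
--     offsets.sort()
--     return [[v for _, v in g]
--             for _, g in itertools.groupby(enumerate(offsets), key=lambda p: p[1] - p[0])]
-- ===== Notes on version B (the rewrite author's own statement) =====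
-- stated objective: idiomatic
-- what changed: Replaces the hand-rolled mutable group/groups loop with the standard enumerate+itertools.groupby consecutive-run idiom (grouping by value minus index), which also drops the seeded empty group on empty input.
-- intended difference: On the empty list A returns [[]] (its seeded empty group is returned unused), while B returns [] (no runs), which is the intended value since there are no offsets to group. — e.g. on groupOffsets([]): A returns [[]], B returns []
import Mathlib
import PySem

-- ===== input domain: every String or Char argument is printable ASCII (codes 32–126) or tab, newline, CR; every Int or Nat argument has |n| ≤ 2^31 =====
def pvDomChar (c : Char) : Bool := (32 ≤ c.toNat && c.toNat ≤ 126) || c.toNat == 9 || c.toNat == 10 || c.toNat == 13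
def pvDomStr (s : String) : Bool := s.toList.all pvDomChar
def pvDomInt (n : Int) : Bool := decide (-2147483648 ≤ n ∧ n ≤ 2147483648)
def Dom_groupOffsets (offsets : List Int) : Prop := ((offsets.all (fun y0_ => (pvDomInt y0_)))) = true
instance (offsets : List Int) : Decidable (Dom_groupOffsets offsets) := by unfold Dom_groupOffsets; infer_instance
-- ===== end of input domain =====

-- B replaces A's mutable group/groups loop by the enumerate+groupby consecutive-run idiom
-- (idiomatic, same cost); both Pythons sort `offsets` in place — the side effect is identical,
-- the equivalence proved is about the return value. On the empty list they intentionally differ (D_).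

-- ===== PORT A =====
-- state is (group, groups-before-current-group); Python's `groups` aliases `group` as its
-- last element, modelled here as st.2 ++ [st.1]
def gStep (st : List Int × List (List Int)) (e : Int) : List Int × List (List Int) :=
  if st.1.length = 0 ∨ (PySem.List.pyGet? st.1 (-1)).map (· + 1) = some e then
    (st.1 ++ [e], st.2)
  else
    ([e], st.2 ++ [st.1])

def groupOffsets (offsets : List Int) : List (List Int) :=
  let s := PySem.List.sorted offsets (fun x => x) false
  let st := s.foldl gStep ([], [])
  st.2 ++ [st.1]

-- ===== PORT B =====
-- hand port of itertools.groupby(enumerate(s), key=λp. p[1]-p[0]) with the values extracted: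
-- i is the enumerate index of v; adjacent elements share a group iff their keys are equal
def gbRuns : Int → List Int → List (List Int)
  | _, [] => []
  | i, v :: rest =>
    match gbRuns (i + 1) rest with
    | (w :: g) :: gs => if w - (i + 1) == v - i then (v :: w :: g) :: gs else [v] :: (w :: g) :: gs
    | _ => [[v]]

def groupOffsets_alt (offsets : List Int) : List (List Int) :=
  let s := PySem.List.sorted offsets (fun x => x) false
  gbRuns 0 s

-- ===== PRECONDITION & SPEC =====
-- On the empty list A returns [[]] (its seeded empty group is returned unused), while B
-- returns [] (no runs), which is the intended value since there are no offsets to group.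
def D_groupOffsets (offsets : List Int) : Prop := offsets = []
instance (offsets : List Int) : Decidable (D_groupOffsets offsets) := by unfold D_groupOffsets; infer_instance

def Spec_groupOffsets (offsets : List Int) (out : List (List Int)) : Prop :=
  ¬ D_groupOffsets offsets → out = groupOffsets_alt offsets
instance (offsets : List Int) (out : List (List Int)) : Decidable (Spec_groupOffsets offsets out) := by unfold Spec_groupOffsets; infer_instance

def pvDiffWitness_groupOffsets : List Int := []
def pvDiffWitnessOut_groupOffsets : (List (List Int)) × (List (List Int)) := ([[]], [])

-- ===== CLAIM (what is proved, stated in full; the proofs are below) =====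
def Claim_unchanged_groupOffsets : Prop := ∀ (offsets : List Int), Dom_groupOffsets offsets → Spec_groupOffsets offsets (groupOffsets offsets)
def Claim_changed_groupOffsets : Prop := Dom_groupOffsets (pvDiffWitness_groupOffsets) ∧ D_groupOffsets (pvDiffWitness_groupOffsets) ∧ groupOffsets (pvDiffWitness_groupOffsets) = pvDiffWitnessOut_groupOffsets.1 ∧ groupOffsets_alt (pvDiffWitness_groupOffsets) = pvDiffWitnessOut_groupOffsets.2 ∧ pvDiffWitnessOut_groupOffsets.1 ≠ pvDiffWitnessOut_groupOffsets.2
def Claim_exact_groupOffsets : Prop := ∀ (offsets : List Int), Dom_groupOffsets offsets → D_groupOffsets offsets → groupOffsets offsets ≠ groupOffsets_alt offsets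

-- ===== LEMMAS AND PROOFS =====

-- reference grouping into maximal consecutive runs (right-to-left)
def runs : List Int → List (List Int)
  | [] => []
  | v :: rest =>
    match runs rest with
    | (w :: g) :: gs => if w = v + 1 then (v :: w :: g) :: gs else [v] :: (w :: g) :: gs
    | _ => [[v]]

theorem runs_cons_shape (v : Int) (rest : List Int) :
    ∃ g gs, runs (v :: rest) = (v :: g) :: gs := by
  rcases h : runs rest with _ | ⟨_ | ⟨w, g⟩, gs⟩ <;> simp [runs, h]
  split_ifs <;> exact ⟨_, _, rfl⟩

theorem gbRuns_eq_runs (s : List Int) : ∀ i, gbRuns i s = runs s := by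
  induction s with
  | nil => intro i; rfl
  | cons v rest ih =>
    intro i
    rw [gbRuns, runs, ih]
    rcases h : runs rest with _ | ⟨_ | ⟨w, g⟩, gs⟩
    · rfl
    · rfl
    · have hb : (w - (i + 1) == v - i) = decide (w = v + 1) := by
        by_cases hw : w = v + 1 <;> simp [hw] <;> omega
      simp only [hb]
      by_cases hw : w = v + 1 <;> simp [hw]

-- how continuing A's loop from a group ending in v interacts with the runs of the rest
def glue (v : Int) (G : List Int) : List (List Int) → List (List Int)
  | (w :: g) :: gs => if w = v + 1 then (G ++ w :: g) :: gs else G :: (w :: g) :: gs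
  | _ => [G]

theorem glue_singleton (e : Int) (s : List Int) : glue e [e] (runs s) = runs (e :: s) := by
  rcases h : runs s with _ | ⟨_ | ⟨w, g⟩, gs⟩ <;>
    simp [glue, runs, h]

theorem glue_step (v : Int) (H : List Int) (s : List Int) :
    glue (v + 1) (H ++ [v + 1]) (runs s) = glue v H (runs ((v + 1) :: s)) := by
  rcases s with _ | ⟨x, t⟩
  · simp [runs, glue]
  · obtain ⟨g, gs, hg⟩ := runs_cons_shape x t
    rw [hg]
    conv_rhs => rw [runs, hg]
    by_cases hx : x = v + 1 + 1
    · simp [glue, hx]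
    · simp [glue, hx]

theorem aLoop (s : List Int) : ∀ (G : List Int) (v : Int) (p : List (List Int)),
    (s.foldl gStep (G ++ [v], p)).2 ++ [(s.foldl gStep (G ++ [v], p)).1]
      = p ++ glue v (G ++ [v]) (runs s) := by
  induction s with
  | nil => intro G v p; simp [runs, glue]
  | cons e s' ih =>
    intro G v p
    have hstep : gStep (G ++ [v], p) e =
        if e = v + 1 then ((G ++ [v]) ++ [e], p) else ([e], p ++ [G ++ [v]]) := by
      simp only [gStep, PySem.List.pyGet?_neg_one_append_singleton]
      by_cases h : e = v + 1 <;> simp [h] <;> omega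
    by_cases h : e = v + 1
    · subst h
      rw [List.foldl_cons, hstep, if_pos rfl, ih]
      rw [glue_step]
    · rw [List.foldl_cons, hstep, if_neg h, show ([e] : List Int) = [] ++ [e] from rfl, ih]
      simp only [List.nil_append]
      rw [glue_singleton]
      obtain ⟨g, gs, hg⟩ := runs_cons_shape e s'
      rw [hg]
      simp [glue, show ¬ e = v + 1 from h]

theorem groupOffsets_spec : Claim_unchanged_groupOffsets := by
  intro offsets _ hD
  have hne : offsets ≠ [] := hD
  unfold groupOffsets groupOffsets_alt
  simp only
  rcases hs : PySem.List.sorted offsets (fun x => x) false with _ | ⟨v, s'⟩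
  · have hp := PySem.List.sorted_perm offsets (fun x => x) false
    rw [hs] at hp
    exact absurd hp.nil_eq.symm hne
  · have h0 : gStep ([], []) v = ([] ++ [v], []) := by simp [gStep]
    rw [List.foldl_cons, h0, aLoop, gbRuns_eq_runs]
    simp only [List.nil_append]
    exact glue_singleton v s'

theorem groupOffsets_changed : Claim_changed_groupOffsets := by
  unfold Claim_changed_groupOffsets; decide

theorem groupOffsets_tight : Claim_exact_groupOffsets := by
  intro offsets _ hD
  subst hD
  decide
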